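-- pv_equiv track=rewrite | github.com/AI4EPS/QuakeFlow | datasets/NCEDC/convert_hdf5.py | flip_polarity
-- ===== SOURCE A (Python) =====
-- def flip_polarity(phase_polarity, pha_channel_dips):
--     pol_out = []
--     for pol, cha_dip in zip(phase_polarity, pha_channel_dips):
--         if pol == 'U' or pol == '+':
--             if cha_dip == -90:
--                 pol_out.append('U')
--             elif cha_dip == 90:
--                 pol_out.append('D')
--             else:
--                 pol_out.append('N')
--         elif pol == 'D' or pol == '-':
--             if cha_dip == -90:
--                 pol_out.append('D')
--             elif cha_dip == 90:
--                 pol_out.append('U')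
--             else:
--                 pol_out.append('N')
--         else:
--             pol_out.append('N')
--     return pol_out
-- ===== SOURCE B (Python) =====
-- def _pol_sign(p):
--     # +1 for up-like, -1 for down-like, 0 for unknown
--     if p == 'U' or p == '+':
--         return 1
--     if p == 'D' or p == '-':
--         return -1
--     return 0
--
--
-- def _dip_sign(d):
--     # flip factor of the channel: +1 keeps polarity, -1 flips it, 0 invalidates
--     if d == -90:
--         return 1
--     if d == 90:
--         return -1
--     return 0
--
--
-- def flip_polarity(phase_polarity, pha_channel_dips):
--     # Staged arithmetic encoding: encode polarity and dip as signs in two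
--     # separate passes, then the product's sign is the flipped label.
--     signs = [_pol_sign(p) for p in phase_polarity]
--     flips = [_dip_sign(d) for d in pha_channel_dips]
--     return ['U' if v == 1 else 'D' if v == -1 else 'N'
--             for v in (s * f for s, f in zip(signs, flips))]
-- ===== Notes on version B (the rewrite author's own statement) =====
-- stated objective: alternative
-- what changed: Replaces the nested branch tree with a signed arithmetic encoding computed in staged passes: polarity strings are mapped to signs +1/-1/0, dips to flip factors +1/-1/0, and the label is read off the sign of their product.
import Mathlib
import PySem

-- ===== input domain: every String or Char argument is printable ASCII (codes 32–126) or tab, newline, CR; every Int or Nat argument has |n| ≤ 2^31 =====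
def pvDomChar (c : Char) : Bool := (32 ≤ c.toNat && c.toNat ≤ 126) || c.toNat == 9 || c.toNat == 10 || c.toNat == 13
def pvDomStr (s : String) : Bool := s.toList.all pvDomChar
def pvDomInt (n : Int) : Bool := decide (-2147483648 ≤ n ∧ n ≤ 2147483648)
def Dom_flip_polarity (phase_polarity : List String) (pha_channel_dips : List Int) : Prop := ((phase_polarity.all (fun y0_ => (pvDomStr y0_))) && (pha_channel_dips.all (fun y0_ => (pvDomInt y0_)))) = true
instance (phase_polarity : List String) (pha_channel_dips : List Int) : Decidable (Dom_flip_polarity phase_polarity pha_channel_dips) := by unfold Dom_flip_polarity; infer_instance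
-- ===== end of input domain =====

-- B replaces A's nested branch tree with a staged signed-arithmetic encoding:
-- polarities → signs, dips → flip factors, label = sign of the product (objective: alternative).

-- ===== PORT A =====
-- literal transliteration: loop over zip, nested branches, append to accumulator
def flip_polarity (phase_polarity : List String) (pha_channel_dips : List Int) : List String :=
  (List.zip phase_polarity pha_channel_dips).foldl
    (fun pol_out pc =>
      let pol := pc.1
      let cha_dip := pc.2
      if pol = "U" ∨ pol = "+" then
        if cha_dip = -90 then pol_out ++ ["U"]
        else if cha_dip = 90 then pol_out ++ ["D"]
        else pol_out ++ ["N"]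
      else if pol = "D" ∨ pol = "-" then
        if cha_dip = -90 then pol_out ++ ["D"]
        else if cha_dip = 90 then pol_out ++ ["U"]
        else pol_out ++ ["N"]
      else pol_out ++ ["N"])
    []

-- ===== PORT B =====
def pvPolSign (p : String) : Int :=
  if p = "U" ∨ p = "+" then 1
  else if p = "D" ∨ p = "-" then -1
  else 0

def pvDipSign (d : Int) : Int :=
  if d = -90 then 1
  else if d = 90 then -1
  else 0

def flip_polarity_alt (phase_polarity : List String) (pha_channel_dips : List Int) : List String :=
  let signs := phase_polarity.map pvPolSign
  let flips := pha_channel_dips.map pvDipSign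
  (signs.zip flips).map
    (fun sf => let v := sf.1 * sf.2
               if v = 1 then "U" else if v = -1 then "D" else "N")

-- ===== PRECONDITION & SPEC =====
def Spec_flip_polarity (phase_polarity : List String) (pha_channel_dips : List Int) (out : List String) : Prop := out = flip_polarity_alt phase_polarity pha_channel_dips
instance (phase_polarity : List String) (pha_channel_dips : List Int) (out : List String) : Decidable (Spec_flip_polarity phase_polarity pha_channel_dips out) := by unfold Spec_flip_polarity; infer_instance

-- ===== CLAIM =====
def Claim_equal_flip_polarity : Prop := ∀ (phase_polarity : List String) (pha_channel_dips : List Int), Dom_flip_polarity phase_polarity pha_channel_dips → Spec_flip_polarity phase_polarity pha_channel_dips (flip_polarity phase_polarity pha_channel_dips)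

-- ===== LEMMAS AND PROOFS =====

-- pointwise: the branch tree and the sign-product label agree on any pair
theorem pv_point (p : String) (d : Int) :
    (if p = "U" ∨ p = "+" then
        if d = -90 then "U" else if d = 90 then "D" else "N"
      else if p = "D" ∨ p = "-" then
        if d = -90 then "D" else if d = 90 then "U" else "N"
      else "N")
    = (let v := pvPolSign p * pvDipSign d
       if v = 1 then "U" else if v = -1 then "D" else "N") := by
  simp only [pvPolSign, pvDipSign]
  by_cases h1 : p = "U" ∨ p = "+" <;> by_cases h2 : p = "D" ∨ p = "-" <;>
    by_cases hd1 : d = -90 <;> by_cases hd2 : d = 90 <;> simp_all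

-- the foldl-append accumulation equals a map of the pointwise function
theorem pv_fold (l : List (String × Int)) (acc : List String) :
    l.foldl
      (fun pol_out pc =>
        let pol := pc.1
        let cha_dip := pc.2
        if pol = "U" ∨ pol = "+" then
          if cha_dip = -90 then pol_out ++ ["U"]
          else if cha_dip = 90 then pol_out ++ ["D"]
          else pol_out ++ ["N"]
        else if pol = "D" ∨ pol = "-" then
          if cha_dip = -90 then pol_out ++ ["D"]
          else if cha_dip = 90 then pol_out ++ ["U"]
          else pol_out ++ ["N"]
        else pol_out ++ ["N"]) acc
    = acc ++ l.map (fun pc =>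
        let v := pvPolSign pc.1 * pvDipSign pc.2
        if v = 1 then "U" else if v = -1 then "D" else "N") := by
  induction l generalizing acc with
  | nil => simp
  | cons hd tl ih =>
      simp only [List.foldl_cons, List.map_cons]
      rw [ih, ← pv_point hd.1 hd.2]
      by_cases h1 : hd.1 = "U" ∨ hd.1 = "+" <;> by_cases h2 : hd.1 = "D" ∨ hd.1 = "-" <;>
        by_cases hd1 : hd.2 = -90 <;> by_cases hd2 : hd.2 = 90 <;> simp_all

-- zipping the two mapped lists equals mapping the sign functions over the zipped pair lists
theorem pv_zip_map (ps : List String) (ds : List Int) :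
    (ps.map pvPolSign).zip (ds.map pvDipSign)
      = (ps.zip ds).map (fun pc => (pvPolSign pc.1, pvDipSign pc.2)) := by
  rw [List.zip_map]
  rfl

-- ===== VERDICT =====
theorem flip_polarity_spec : Claim_equal_flip_polarity := by
  intro ps ds _
  unfold Spec_flip_polarity flip_polarity flip_polarity_alt
  rw [pv_fold (List.zip ps ds) []]
  simp only [List.nil_append]
  conv_rhs => rw [show (ps.map pvPolSign).zip (ds.map pvDipSign)
      = (ps.zip ds).map (fun pc => (pvPolSign pc.1, pvDipSign pc.2)) from pv_zip_map ps ds]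
  rw [List.map_map]
  rfl
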